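-- pv_equiv track=rewrite | github.com/Jindongleee/data_crawling | homework/ex10.py | solution
-- ===== SOURCE A (Python) =====
-- def solution(n, m):
--     count = 0
--     day = 0
--     count = n
--     while count != 0:
--         day+=1
--         count -= 1
--         if day % m == 0:
--             count += 1
--
--     return day
-- ===== SOURCE B (Python) =====
-- def solution(n, m):
--     if n == 0:
--         return 0
--     k = abs(m)
--     return n + (n - 1) // (k - 1)
-- ===== Notes on version B (the rewrite author's own statement) =====
-- stated objective: faster
-- what changed: Replaced the day-by-day simulation loop with a closed-form formula: the last day is n + (n-1)//(|m|-1), since every |m|-day block consumes a net of |m|-1.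
import Mathlib
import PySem

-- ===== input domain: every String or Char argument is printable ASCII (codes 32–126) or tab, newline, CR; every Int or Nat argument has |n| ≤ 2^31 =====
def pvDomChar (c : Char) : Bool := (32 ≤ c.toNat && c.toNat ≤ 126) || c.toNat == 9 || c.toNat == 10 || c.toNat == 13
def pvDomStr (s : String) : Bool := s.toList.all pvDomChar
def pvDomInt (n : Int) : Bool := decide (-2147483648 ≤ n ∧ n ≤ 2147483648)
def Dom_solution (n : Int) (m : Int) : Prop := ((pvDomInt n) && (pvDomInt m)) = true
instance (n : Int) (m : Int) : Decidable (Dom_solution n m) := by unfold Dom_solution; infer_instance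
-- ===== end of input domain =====

-- B replaces A's day-by-day simulation loop with a closed-form formula (O(1) instead of O(n)).

-- ===== PORT A =====
-- while count != 0: day += 1; count -= 1; if day % m == 0: count += 1
-- The fuel argument only makes the recursion total; under Pre_solution the loop
-- terminates (count reaches 0) before the fuel is exhausted.
def solLoop (m : Int) : Nat → Int → Int → Int
  | 0, day, _ => day
  | fuel + 1, day, count =>
    if count ≠ 0 then
      let day' := day + 1
      let count' := count - 1
      let count'' := if PySem.Int.mod day' m = 0 then count' + 1 else count'
      solLoop m fuel day' count''
    else day

def solution (n : Int) (m : Int) : Int := solLoop m (2 * n.toNat + 1) 0 n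

-- ===== PORT B =====
def solution_alt (n : Int) (m : Int) : Int :=
  if n = 0 then 0
  else n + PySem.Int.floordiv (n - 1) (|m| - 1)

-- ===== PRECONDITION & SPEC =====
-- Pre_ excludes exactly the inputs on which A never returns: for n < 0 or (n ≠ 0 and |m| = 1)
-- the while loop runs forever, and for n ≠ 0 and m = 0 Python raises ZeroDivisionError at day % m.
def Pre_solution (n : Int) (m : Int) : Prop := 0 ≤ n ∧ (n = 0 ∨ 2 ≤ |m|)
instance (n : Int) (m : Int) : Decidable (Pre_solution n m) := by unfold Pre_solution; infer_instance

def pvWitness_solution : Int × Int := (5, 3)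

def Spec_solution (n : Int) (m : Int) (out : Int) : Prop := out = solution_alt n m
instance (n : Int) (m : Int) (out : Int) : Decidable (Spec_solution n m out) := by unfold Spec_solution; infer_instance

-- ===== CLAIM (what is proved, stated in full; the proofs are below) =====
def Claim_equal_solution : Prop := ∀ (n : Int) (m : Int), Dom_solution n m → Pre_solution n m → Spec_solution n m (solution n m)

-- ===== LEMMAS AND PROOFS =====

-- hFn k d = d - d/k: net units consumed after d days with replenishment every k-th day
def hFn (k d : Nat) : Nat := d - d / k
-- xv k v: the first day d with hFn k d = v (for v ≥ 1); the closed form B computes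
def xv (k v : Nat) : Nat := v + (v - 1) / (k - 1)

lemma hFn_succ_dvd (k d : Nat) (hk : 2 ≤ k) (hdvd : k ∣ (d + 1)) :
    hFn k (d + 1) = hFn k d := by
  obtain ⟨a, ha⟩ := hdvd
  match a, ha with
  | 0, ha => omega
  | a + 1, ha =>
    have hm : k * (a + 1) = k * a + k := Nat.mul_succ k a
    have h1 : (d + 1) / k = a + 1 := by rw [ha, Nat.mul_div_cancel_left _ (by omega)]
    have hd2 : d = k * a + (k - 1) := by omega
    have h2 : d / k = a := by
      rw [hd2, Nat.mul_add_div (by omega), Nat.div_eq_of_lt (show k - 1 < k by omega)]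
      omega
    unfold hFn; omega

lemma hFn_succ_ndvd (k d : Nat) (hk : 2 ≤ k) (hdvd : ¬ k ∣ (d + 1)) :
    hFn k (d + 1) = hFn k d + 1 := by
  have hq := Nat.div_add_mod d k
  have hr : d % k < k := Nat.mod_lt _ (by omega)
  have hrlt : d % k < k - 1 := by
    rcases Nat.lt_or_ge (d % k) (k - 1) with h | h
    · exact h
    · exact absurd ⟨d / k + 1, by rw [Nat.mul_succ]; omega⟩ hdvd
  have h1 : (d + 1) / k = d / k := by
    have he : d + 1 = k * (d / k) + (d % k + 1) := by omega
    rw [he, Nat.mul_add_div (by omega), Nat.div_eq_of_lt (show d % k + 1 < k by omega)]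
    omega
  have h2 : d / k ≤ d := Nat.div_le_self _ _
  unfold hFn; omega

lemma xv_mono (k v v' : Nat) (h : v ≤ v') : xv k v ≤ xv k v' := by
  unfold xv
  exact Nat.add_le_add h (Nat.div_le_div_right (by omega))

lemma hFn_decomp (k d : Nat) (hk : 2 ≤ k) :
    hFn k d = d / k * (k - 1) + d % k := by
  have hq := Nat.div_add_mod d k
  have e1 : d / k * (k - 1) = d / k * k - d / k := by rw [Nat.mul_sub, mul_one]
  have e2 : d / k * k = k * (d / k) := mul_comm _ _
  have e3 : d / k ≤ k * (d / k) := Nat.le_mul_of_pos_left _ (by omega)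
  unfold hFn; omega

lemma xv_gt (k d c : Nat) (hk : 2 ≤ k) (hc : 1 ≤ c) : d < xv k (hFn k d + c) := by
  have hmono := xv_mono k (hFn k d + 1) (hFn k d + c) (by omega)
  have hq := Nat.div_add_mod d k
  have hh := hFn_decomp k d hk
  have e1 : d / k * (k - 1) = d / k * k - d / k := by rw [Nat.mul_sub, mul_one]
  have e2 : d / k * k = k * (d / k) := mul_comm _ _
  have e3 : d / k ≤ k * (d / k) := Nat.le_mul_of_pos_left _ (by omega)
  have hdiv : d / k ≤ hFn k d / (k - 1) := by
    rw [Nat.le_div_iff_mul_le (by omega)]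
    have e4 : d / k * (k - 1) = (k - 1) * (d / k) := mul_comm _ _
    omega
  have hlt : d < xv k (hFn k d + 1) := by
    unfold xv
    rw [Nat.add_sub_cancel]
    omega
  omega

lemma xv_eq_succ (k d : Nat) (hk : 2 ≤ k) (hdvd : ¬ k ∣ (d + 1)) :
    xv k (hFn k d + 1) = d + 1 := by
  have hstep := hFn_succ_ndvd k d hk hdvd
  have hq := Nat.div_add_mod (d + 1) k
  have hbk : (d + 1) % k < k := Nat.mod_lt _ (by omega)
  have hb1 : 1 ≤ (d + 1) % k := by
    rcases Nat.eq_zero_or_pos ((d + 1) % k) with h | h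
    · exact absurd ⟨(d + 1) / k, by omega⟩ hdvd
    · exact h
  have hh := hFn_decomp k (d + 1) hk
  rw [← hstep, hh]
  unfold xv
  have e2 : (d + 1) / k * (k - 1) = (k - 1) * ((d + 1) / k) := mul_comm _ _
  have h1 : (d + 1) / k * (k - 1) + (d + 1) % k - 1
      = (k - 1) * ((d + 1) / k) + ((d + 1) % k - 1) := by omega
  rw [h1, Nat.mul_add_div (by omega),
      Nat.div_eq_of_lt (show (d + 1) % k - 1 < k - 1 by omega)]
  have e4 : (d + 1) / k * (k - 1) = (d + 1) / k * k - (d + 1) / k := by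
    rw [Nat.mul_sub, mul_one]
  have e5 : (d + 1) / k * k = k * ((d + 1) / k) := mul_comm _ _
  have e3 : (d + 1) / k ≤ k * ((d + 1) / k) := Nat.le_mul_of_pos_left _ (by omega)
  omega

lemma solLoop_stop (m : Int) (fuel : Nat) (day : Int) : solLoop m fuel day 0 = day := by
  cases fuel <;> simp [solLoop]

lemma mod_cond (m : Int) (d : Nat) :
    (PySem.Int.mod (d : Int) m = 0) ↔ m.natAbs ∣ d := by
  rw [PySem.Int.mod_eq_zero_iff_dvd, ← Int.natAbs_dvd, Int.natCast_dvd_natCast]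

lemma loop_main (m : Int) (hk : 2 ≤ m.natAbs) :
    ∀ (fuel day count : Nat), 1 ≤ count →
      xv m.natAbs (hFn m.natAbs day + count) ≤ day + fuel →
      solLoop m fuel (day : Int) (count : Int) =
        ((xv m.natAbs (hFn m.natAbs day + count) : Nat) : Int) := by
  intro fuel
  induction fuel with
  | zero =>
    intro day count hc hb
    exact absurd hb (by have := xv_gt m.natAbs day count hk hc; omega)
  | succ fuel ih =>
    intro day count hc hb
    have hcne : (count : Int) ≠ 0 := by exact_mod_cast (by omega : count ≠ 0)
    have hcast : (day : Int) + 1 = ((day + 1 : Nat) : Int) := by push_cast; ring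
    simp only [solLoop, hcne, ne_eq, not_false_eq_true, if_pos]
    rw [hcast]
    by_cases hd : m.natAbs ∣ (day + 1)
    · rw [if_pos ((mod_cond m (day + 1)).mpr hd)]
      have hc2 : (count : Int) - 1 + 1 = ((count : Nat) : Int) := by ring
      rw [hc2]
      rw [ih (day + 1) count hc
        (by rw [hFn_succ_dvd m.natAbs day hk hd]; omega)]
      rw [hFn_succ_dvd m.natAbs day hk hd]
    · rw [if_neg (fun h => hd ((mod_cond m (day + 1)).mp h))]
      rcases Nat.lt_or_ge count 2 with h1 | h2
      · -- count = 1: the loop stops at day + 1, the first day with hFn = hFn day + 1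
        have hc1 : count = 1 := by omega
        subst hc1
        have : ((1 : Nat) : Int) - 1 = (0 : Int) := by ring
        rw [this, solLoop_stop, xv_eq_succ m.natAbs day hk hd]
      · have hc2 : (count : Int) - 1 = ((count - 1 : Nat) : Int) := by omega
        rw [hc2]
        have harg : hFn m.natAbs (day + 1) + (count - 1) = hFn m.natAbs day + count := by
          rw [hFn_succ_ndvd m.natAbs day hk hd]; omega
        rw [ih (day + 1) (count - 1) (by omega) (by rw [harg]; omega), harg]

theorem solution_spec : Claim_equal_solution := by
  intro n m _ hpre
  obtain ⟨hn, hpre⟩ := hpre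
  unfold Spec_solution
  by_cases h0 : n = 0
  · subst h0; simp [solution, solLoop, solution_alt]
  · have hm : 2 ≤ m.natAbs := by
      rcases hpre with h | h
      · exact absurd h h0
      · exact_mod_cast (Int.abs_eq_natAbs m) ▸ h
    set N := n.toNat with hN
    have hn1 : 1 ≤ N := by omega
    have hcastn : (N : Int) = n := Int.toNat_of_nonneg hn
    have hh0 : hFn m.natAbs 0 = 0 := by simp [hFn]
    have hxv : xv m.natAbs N = N + (N - 1) / (m.natAbs - 1) := rfl
    have hbound : xv m.natAbs (hFn m.natAbs 0 + N) ≤ 0 + (2 * N + 1) := by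
      rw [hh0, Nat.zero_add]
      have := Nat.div_le_self (N - 1) (m.natAbs - 1)
      unfold xv; omega
    have := loop_main m hm (2 * N + 1) 0 N hn1 hbound
    rw [Nat.cast_zero, hcastn] at this
    unfold solution
    rw [← hN, this, hh0, Nat.zero_add]
    unfold solution_alt
    rw [if_neg h0]
    have habs : |m| = ((m.natAbs : Nat) : Int) := Int.abs_eq_natAbs m
    have h1 : n - 1 = ((N - 1 : Nat) : Int) := by omega
    have h2 : |m| - 1 = ((m.natAbs - 1 : Nat) : Int) := by rw [habs]; push_cast; omega
    rw [h1, h2, PySem.Int.floordiv_natCast, hxv]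
    push_cast
    omega
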